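-- pv_equiv track=rewrite | github.com/Derling/algorithms | python/cannibal_numbers.py | cannibal_numbers
-- ===== SOURCE A (Python) =====
-- def cannibal_numbers(array, query):
--     ''' iterative solution '''
--     if not array: # empty array
--         return 0
--     if len(array) == 1: # one element in array
--         return 1 if array[0] >= query else 0
--     cannibals = 0
--     array = sorted(array)
--     for i in range(len(array)):
--         if not array: # array is empty because of loop so we should break
--             break
--         elif array[-1] >= query:
--             # highest element meets criteria, remove it and increment count
--             cannibals += 1
--             array.pop()
--         else:
--             # highest integer less than query, increment it and remove smallest
--             array[-1] = array[-1] + 1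
--             array.pop(0)
--     return cannibals
-- ===== SOURCE B (Python) =====
-- def cannibal_numbers(array, query):
--     ''' sort once, then a two-pointer sweep: the top element needs
--     query - a[hi] boosts, each boost consumes one smallest element,
--     so whole runs of A's unit steps are done with one arithmetic jump '''
--     a = sorted(array)
--     lo, hi, count = 0, len(a) - 1, 0
--     while lo <= hi:
--         need = query - a[hi]
--         if need <= 0:
--             count += 1
--             hi -= 1
--         elif need <= hi - lo:
--             lo += need
--             count += 1
--             hi -= 1
--         else:
--             lo = hi + 1  # not enough fodder: everything left is consumed
--     return count
-- ===== Notes on version B (the rewrite author's own statement) =====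
-- stated objective: faster
-- what changed: Replaces A's element-by-element simulation (pop/pop(0) on a shrinking list, one unit boost per iteration) by a sort plus two-pointer sweep that computes each needed boost count arithmetically and jumps the low pointer.
import Mathlib
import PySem

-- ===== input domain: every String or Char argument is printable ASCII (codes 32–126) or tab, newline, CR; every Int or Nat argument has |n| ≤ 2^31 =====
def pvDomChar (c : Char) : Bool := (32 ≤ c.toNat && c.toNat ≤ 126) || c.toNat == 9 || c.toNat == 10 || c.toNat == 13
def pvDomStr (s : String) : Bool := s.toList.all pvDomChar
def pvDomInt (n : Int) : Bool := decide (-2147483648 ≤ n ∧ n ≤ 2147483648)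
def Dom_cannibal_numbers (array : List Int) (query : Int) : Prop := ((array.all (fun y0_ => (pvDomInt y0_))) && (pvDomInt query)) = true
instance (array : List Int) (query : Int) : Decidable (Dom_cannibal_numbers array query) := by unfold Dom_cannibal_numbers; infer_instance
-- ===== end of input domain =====

-- B replaces A's one-element-per-iteration simulation by a sort + two-pointer sweep with
-- arithmetic jumps (objective: faster). A only rebinds its `array` parameter, no caller-visible mutation.

-- ===== PORT A =====
-- body of A's for-loop; the loop index i is unused by the body.
-- state = (array, cannibals); `break` leaves the state unchanged for the remaining indices,
-- which is exact here because the broken-on state (arr = []) is a fixed point of the body.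
def cannibalStepA (query : Int) (st : List Int × Int) (_i : Int) : List Int × Int :=
  let arr := st.1
  let cannibals := st.2
  if arr = [] then st                                   -- if not array: break
  else if ((PySem.List.pyGet? arr (-1)).getD 0) ≥ query then   -- array[-1] (arr ≠ [], so in range)
    (arr.dropLast, cannibals + 1)                       -- cannibals += 1; array.pop()
  else
    -- array[-1] = array[-1] + 1; array.pop(0)
    ((arr.set (arr.length - 1) (((PySem.List.pyGet? arr (-1)).getD 0) + 1)).drop 1, cannibals)

def cannibal_numbers (array : List Int) (query : Int) : Int :=
  if array = [] then 0
  else if array.length = 1 then (if ((PySem.List.pyGet? array 0).getD 0) ≥ query then 1 else 0)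
  else
    let arr := PySem.List.sorted array (fun v => v) false
    ((PySem.List.pyRange 0 (arr.length : Int) 1).foldl (cannibalStepA query) (arr, 0)).2

-- ===== PORT B =====
-- B's while-loop; a[hi] is in range whenever the loop body runs, so pyGet? returns some.
def cannibalSweep (a : List Int) (query : Int) (lo hi count : Int) : Int :=
  if h : lo ≤ hi then
    let need := query - ((PySem.List.pyGet? a hi).getD 0)    -- a[hi]
    if need ≤ 0 then cannibalSweep a query lo (hi - 1) (count + 1)
    else if need ≤ hi - lo then cannibalSweep a query (lo + need) (hi - 1) (count + 1)
    else cannibalSweep a query (hi + 1) hi count             -- lo = hi + 1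
  else count
termination_by (hi + 1 - lo).toNat
decreasing_by all_goals omega

def cannibal_numbers_alt (array : List Int) (query : Int) : Int :=
  let a := PySem.List.sorted array (fun v => v) false
  cannibalSweep a query 0 ((a.length : Int) - 1) 0

-- ===== PRECONDITION & SPEC =====
def Spec_cannibal_numbers (array : List Int) (query : Int) (out : Int) : Prop := out = cannibal_numbers_alt array query
instance (array : List Int) (query : Int) (out : Int) : Decidable (Spec_cannibal_numbers array query out) := by unfold Spec_cannibal_numbers; infer_instance

-- ===== CLAIM (what is proved, stated in full; the proofs are below) =====
def Claim_equal_cannibal_numbers : Prop := ∀ (array : List Int) (query : Int), Dom_cannibal_numbers array query → Spec_cannibal_numbers array query (cannibal_numbers array query)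

-- ===== LEMMAS AND PROOFS =====

-- the value of A's consuming loop run to exhaustion, as a recursion on the list
def fRun (q : Int) : List Int → Int
  | [] => 0
  | x :: rest =>
    if ((PySem.List.pyGet? (x :: rest) (-1)).getD 0) ≥ q then
      1 + fRun q (x :: rest).dropLast
    else
      fRun q (((x :: rest).set ((x :: rest).length - 1) (((PySem.List.pyGet? (x :: rest) (-1)).getD 0) + 1)).drop 1)
termination_by l => l.length
decreasing_by all_goals simp

theorem fRun_cons (q x : Int) (rest : List Int) :
    fRun q (x :: rest) =
      if ((PySem.List.pyGet? (x :: rest) (-1)).getD 0) ≥ q then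
        1 + fRun q (x :: rest).dropLast
      else
        fRun q (((x :: rest).set ((x :: rest).length - 1) (((PySem.List.pyGet? (x :: rest) (-1)).getD 0) + 1)).drop 1) := by
  rw [fRun]

theorem set_concat_last (u : List Int) (m v : Int) : (u ++ [m]).set u.length v = u ++ [v] := by
  induction u with
  | nil => rfl
  | cons x rest ih => simp [ih]

theorem fRun_concat (q : Int) (u : List Int) (m : Int) :
    fRun q (u ++ [m]) =
      if m ≥ q then 1 + fRun q u
      else fRun q ((u ++ [m]).set u.length (m + 1) |>.drop 1) := by
  cases u with
  | nil => simp [fRun_cons, PySem.List.pyGet?_neg_one]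
  | cons x rest =>
      rw [List.cons_append, fRun_cons]
      have h1 : PySem.List.pyGet? (x :: (rest ++ [m])) (-1) = some m := by
        rw [← List.cons_append, PySem.List.pyGet?_neg_one, List.getLast?_concat]
      rw [h1]
      simp only [Option.getD_some]
      have h2 : (x :: (rest ++ [m])).dropLast = x :: rest := by
        rw [← List.cons_append, List.dropLast_concat]
      have h3 : ((x :: (rest ++ [m])).set ((x :: (rest ++ [m])).length - 1) (m + 1)).drop 1
          = rest ++ [m + 1] := by
        rw [← List.cons_append]
        have hl : ((x :: rest) ++ [m]).length - 1 = (x :: rest).length := by simp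
        rw [hl, set_concat_last]
        simp
      have h4 : ((x :: (rest ++ [m])).set (x :: rest).length (m + 1)).drop 1
          = rest ++ [m + 1] := by
        rw [← List.cons_append, set_concat_last]
        simp
      rw [h2, h3, h4]

theorem fRun_concat_ge (q : Int) (u : List Int) (m : Int) (h : m ≥ q) :
    fRun q (u ++ [m]) = 1 + fRun q u := by
  rw [fRun_concat]; simp [h]

theorem fRun_concat_lt (q : Int) (u : List Int) (m : Int) (h : m < q) :
    fRun q (u ++ [m]) =
      if (q - m) ≤ (u.length : Int) then 1 + fRun q (u.drop (q - m).toNat) else 0 := by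
  induction u generalizing m with
  | nil =>
      rw [fRun_concat]
      simp only [List.length_nil, List.nil_append]
      rw [if_neg (by omega), if_neg (by simp; omega)]
      simp [fRun]
  | cons x rest ih =>
      rw [fRun_concat, if_neg (by omega), set_concat_last]
      simp only [List.cons_append, List.drop_succ_cons, List.drop]
      by_cases h1 : m + 1 < q
      · rw [ih (m + 1) h1]
        have hd : (q - m).toNat = (q - (m + 1)).toNat + 1 := by omega
        rw [hd]
        simp only [List.length_cons, List.drop_succ_cons]
        by_cases h2 : q - (m + 1) ≤ (rest.length : Int)
        · rw [if_pos h2, if_pos (by push_cast; omega)]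
        · rw [if_neg h2, if_neg (by push_cast; omega)]
      · have hm : q - m = 1 := by omega
        rw [fRun_concat_ge q rest (m + 1) (by omega)]
        rw [if_pos (by simp; omega), hm]
        simp

-- A's loop: on a list whose length equals the number of remaining indices, it empties the
-- list and adds fRun to the counter
theorem foldA (q : Int) (l : List Int) : ∀ (arr : List Int) (c : Int), arr.length = l.length →
    l.foldl (cannibalStepA q) (arr, c) = ([], c + fRun q arr) := by
  induction l with
  | nil =>
      intro arr c h
      cases arr with
      | nil => simp [fRun]
      | cons x rest => simp at h
  | cons i l' ih =>
      intro arr c h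
      cases arr with
      | nil => simp at h
      | cons x rest =>
          rw [List.foldl_cons, fRun_cons]
          by_cases hge : ((PySem.List.pyGet? (x :: rest) (-1)).getD 0) ≥ q
          · have hstep : cannibalStepA q (x :: rest, c) i = ((x :: rest).dropLast, c + 1) := by
              unfold cannibalStepA
              rw [if_neg (by simp), if_pos hge]
            rw [hstep, if_pos hge, ih _ (c + 1) (by simp at h ⊢; omega)]
            ring_nf
          · have hstep : cannibalStepA q (x :: rest, c) i =
                (((x :: rest).set ((x :: rest).length - 1)
                  (((PySem.List.pyGet? (x :: rest) (-1)).getD 0) + 1)).drop 1, c) := by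
              unfold cannibalStepA
              rw [if_neg (by simp), if_neg hge]
            rw [hstep, if_neg hge, ih _ c (by simp at h ⊢; omega)]

-- segment of the sorted list between B's two pointers
theorem sweep_eq (a : List Int) (q : Int) : ∀ (n : ℕ) (lo hi c : Int),
    (hi + 1 - lo).toNat = n → 0 ≤ lo → lo ≤ hi + 1 → hi < (a.length : Int) →
    cannibalSweep a q lo hi c = c + fRun q ((a.take (hi + 1).toNat).drop lo.toNat) := by
  intro n
  induction n using Nat.strong_induction_on with
  | _ n ih =>
    intro lo hi c hn hlo hlohi hhi
    by_cases h : lo ≤ hi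
    · -- loop body runs
      have hhiN : hi.toNat < a.length := by omega
      have hget : (PySem.List.pyGet? a hi).getD 0 = a.getD hi.toNat 0 := by
        rw [PySem.List.pyGet?_eq_some_getElem a (by omega) hhi]
        simp [List.getD, List.getElem?_eq_getElem hhiN]
      have htake : a.take (hi + 1).toNat = a.take hi.toNat ++ [a.getD hi.toNat 0] := by
        have h' : (hi + 1).toNat = hi.toNat + 1 := by omega
        rw [h', List.take_succ_eq_append_getElem hhiN, ← List.getD_eq_getElem a 0 hhiN]
      have hseg : (a.take (hi + 1).toNat).drop lo.toNat
          = (a.take hi.toNat).drop lo.toNat ++ [a.getD hi.toNat 0] := by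
        rw [htake, List.drop_append_of_le_length (by simp; omega)]
      have hulen : ((a.take hi.toNat).drop lo.toNat).length = hi.toNat - lo.toNat := by
        simp; omega
      rw [cannibalSweep, dif_pos h, hget]
      by_cases h1 : q - a.getD hi.toNat 0 ≤ 0
      · rw [if_pos h1, ih (hi - 1 + 1 - lo).toNat (by omega) lo (hi - 1) (c + 1) rfl hlo
            (by omega) (by omega)]
        have : (hi - 1 + 1).toNat = hi.toNat := by omega
        rw [this, hseg, fRun_concat_ge q ((a.take hi.toNat).drop lo.toNat) (a.getD hi.toNat 0) (by omega)]
        ring_nf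
      · rw [if_neg h1]
        by_cases h2 : q - a.getD hi.toNat 0 ≤ hi - lo
        · rw [if_pos h2, ih (hi - 1 + 1 - (lo + (q - a.getD hi.toNat 0))).toNat (by omega)
              (lo + (q - a.getD hi.toNat 0)) (hi - 1) (c + 1) rfl (by omega) (by omega) (by omega)]
          have he : (hi - 1 + 1).toNat = hi.toNat := by omega
          rw [he, hseg, fRun_concat_lt q ((a.take hi.toNat).drop lo.toNat) (a.getD hi.toNat 0) (by omega), if_pos (by rw [hulen]; omega)]
          have hdd : (a.take hi.toNat).drop (lo + (q - a.getD hi.toNat 0)).toNat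
              = ((a.take hi.toNat).drop lo.toNat).drop (q - a.getD hi.toNat 0).toNat := by
            rw [List.drop_drop]
            congr 1
            omega
          rw [hdd]
          ring_nf
        · rw [if_neg h2, cannibalSweep, dif_neg (by omega), hseg,
              fRun_concat_lt q ((a.take hi.toNat).drop lo.toNat) (a.getD hi.toNat 0) (by omega), if_neg (by rw [hulen]; omega)]
          ring
    · -- lo = hi + 1: empty segment
      rw [cannibalSweep, dif_neg h]
      have : (a.take (hi + 1).toNat).drop lo.toNat = [] := by
        apply List.drop_eq_nil_of_le
        simp
        omega
      rw [this]
      simp [fRun]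

theorem alt_eq_fRun (array : List Int) (q : Int) :
    cannibal_numbers_alt array q = fRun q (PySem.List.sorted array (fun v => v) false) := by
  unfold cannibal_numbers_alt
  simp only []
  set a := PySem.List.sorted array (fun v => v) false with ha
  rw [sweep_eq a q ((a.length : Int) - 1 + 1 - 0).toNat 0 ((a.length : Int) - 1) 0 rfl
      (by omega) (by omega) (by omega)]
  have : ((a.length : Int) - 1 + 1).toNat = a.length := by omega
  rw [this]
  simp

theorem a_eq_fRun (array : List Int) (q : Int) :
    cannibal_numbers array q = fRun q (PySem.List.sorted array (fun v => v) false) := by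
  unfold cannibal_numbers
  by_cases h0 : array = []
  · subst h0
    have hnil : PySem.List.sorted ([] : List Int) (fun v => v) false = [] := by decide
    simp [hnil, fRun]
  · rw [if_neg h0]
    by_cases h1 : array.length = 1
    · obtain ⟨x, hx⟩ := List.length_eq_one_iff.mp h1
      subst hx
      have hs : PySem.List.sorted [x] (fun v => v) false = [x] :=
        PySem.List.sorted_eq_self_of_pairwise [x] (fun v => v) (by simp)
      rw [if_pos h1, hs, fRun_cons]
      simp [PySem.List.pyGet?_neg_one, fRun]
    · rw [if_neg h1]
      simp only []
      rw [foldA q (PySem.List.pyRange 0 ((PySem.List.sorted array (fun v => v) false).length : Int) 1)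
          (PySem.List.sorted array (fun v => v) false) 0
          (by rw [PySem.List.length_pyRange_one]; omega)]
      simp

-- ===== VERDICT (by name: the statement is the Claim_ definition above) =====
theorem cannibal_numbers_spec : Claim_equal_cannibal_numbers := by
  intro array query _
  unfold Spec_cannibal_numbers
  rw [a_eq_fRun, alt_eq_fRun]
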